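-- pv_equiv track=rewrite | github.com/ispeakpurebinary/comp-202 | Secret Message decoder.py | string2list
-- ===== SOURCE A (Python) =====
-- def is_not_valid(a):
--     '''
--     Goes through all the characters in a string. If one of the characters \
--     is not a letter or space character, returns true. Else it returns False.
--     Parameters:
--         a(string): user input
--     Returns:
--         (boolean): result of whether the length of string is a square number
--     Examples:
--     >>> is_not_valid('Hello0w rld45')
--     True
--     >>> is_not_valid('Hey I am Sara')
--     False
--     >>> is_not_valid('123456')
--     True
--     '''
--     for char in a:
--         ascii_value = ord(char)
--         #Comparing characters with ascii values to see if conditions are met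
--         if not (65<= ascii_value <=90 or 97<= ascii_value <= 122 or
--                 ascii_value == 32):
--             return True
--     else:
--         return False
--
-- def is_not_square(b):
--     '''
--     Checks whether the length of a string is a squared number
--     Parameters:
--         b(string): user input
--     Returns:
--         (boolean): result of whether the length of string is a square number
--     Examples:
--         >>> is_not_square('abcdefghi')
--         False
--         >>> is_not_square('1234567891')
--         True
--         >>> is_not_square('lmno')
--         False
--
--     '''
--     length = len(b)
--     i = 1
--     while length >= i * i:
--         if i * i == length:
--             return False
--         i += 1
--     return True
--
-- def string2list(c):
--     '''
--     Converts a string that only contains letters and spaces into a list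
--     Parameters:
--         c(string): user input
--     Returns:
--         (list): elements of the string in a 2D square list
--     Examples:
--     >>> string2list('abcdefghi')
--     [['a', 'b', 'c'], ['d', 'e', 'f'], ['g', 'h', 'i']]
--     >>> string2list('check this')
--     []
--     >>> string2list('hello bye')
--     [['h', 'e', 'l'], ['l', 'o', ' '], ['b', 'y', 'e']]
--     '''
--     #Checking string validity
--     if is_not_valid(c) or is_not_square(c) or not 1<= len(c) <= 1000:
--         return []
--     n = 1
--     while n * n < len(c):
--         n+=1
--
--     if n * n != len(c):
--         return[]
--     #Creating 2d list
--     result = []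
--     for i in range(0,len(c),n):
--         row = list(c[i:i + n])
--         result.append(row)
--     return result
-- ===== SOURCE B (Python) =====
-- def string2list(c):
--     L = len(c)
--     if not (1 <= L <= 1000):
--         return []
--     if any(not (ch == ' ' or 'A' <= ch <= 'Z' or 'a' <= ch <= 'z') for ch in c):
--         return []
--     n = round(L ** 0.5)          # closed-form integer square root (exact for L <= 1000)
--     if n * n != L:
--         return []
--     return [list(c[i * n:(i + 1) * n]) for i in range(n)]
-- ===== Notes on version B (the rewrite author's own statement) =====
-- stated objective: simpler
-- what changed: B replaces A's three incremental square-search loops (is_not_square's trial loop plus string2list's own while loop re-deriving n) with one closed-form integer square root n = round(len(c)**0.5) checked by n*n == len(c), and builds the grid as a single row comprehension indexed by n; it also tests the length bound before scanning the characters.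
import Mathlib
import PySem

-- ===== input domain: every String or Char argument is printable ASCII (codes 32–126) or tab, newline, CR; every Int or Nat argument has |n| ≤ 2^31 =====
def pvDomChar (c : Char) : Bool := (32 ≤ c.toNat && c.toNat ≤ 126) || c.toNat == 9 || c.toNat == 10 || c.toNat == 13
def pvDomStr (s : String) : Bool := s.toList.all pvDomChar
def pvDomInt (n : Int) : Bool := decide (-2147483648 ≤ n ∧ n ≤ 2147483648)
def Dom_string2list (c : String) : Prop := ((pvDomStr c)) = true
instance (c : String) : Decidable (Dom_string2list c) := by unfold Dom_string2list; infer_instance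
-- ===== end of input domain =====

-- B replaces A's three incremental square-root-search loops with one closed-form integer
-- square root and a row comprehension (objective: simpler).

-- ===== PORT A =====
-- is_not_valid: for-loop with early return True on the first non-letter/space character
def isNotValid : List Char → Bool
  | [] => false
  | ch :: rest =>
      let v := ch.toNat
      if ¬(65 ≤ v ∧ v ≤ 90 ∨ 97 ≤ v ∧ v ≤ 122 ∨ v = 32) then true else isNotValid rest

-- is_not_square's while loop: i counts up from 1 while length ≥ i*i
def isNotSquareLoop (length i : Nat) : Bool :=
  if length ≥ i * i then
    (if i * i = length then false else isNotSquareLoop length (i + 1))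
  else true
termination_by length + 1 - i
decreasing_by
  rcases Nat.eq_zero_or_pos i with h0 | h0
  · omega
  · have := Nat.le_mul_of_pos_left i h0; omega

def isNotSquare (cs : List Char) : Bool := isNotSquareLoop cs.length 1

-- string2list's own while loop: n counts up from 1 while n*n < len(c)
def nLoop (len n : Nat) : Nat :=
  if n * n < len then nLoop len (n + 1) else n
termination_by len + 1 - n
decreasing_by
  rcases Nat.eq_zero_or_pos n with h0 | h0
  · omega
  · have := Nat.le_mul_of_pos_left n h0; omega

def string2list (c : String) : List (List String) :=
  let cs := c.toList
  if isNotValid cs || isNotSquare cs || !(decide (1 ≤ cs.length ∧ cs.length ≤ 1000)) then []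
  else
    let n := nLoop cs.length 1
    if n * n ≠ cs.length then []
    else
      -- for i in range(0, len(c), n): result.append(list(c[i:i+n]))
      (PySem.List.pyRange 0 (cs.length : Int) (n : Int)).foldl
        (fun result i =>
          result ++ [(PySem.List.slice cs (some i) (some (i + (n : Int)))).map
                       (fun ch => String.mk [ch])]) []

-- ===== PORT B =====
def string2list_alt (c : String) : List (List String) :=
  let cs := c.toList
  let L := cs.length
  if ¬(1 ≤ L ∧ L ≤ 1000) then []
  else if cs.any (fun ch =>
      !(ch == ' ' || (decide ('A' ≤ ch) && decide (ch ≤ 'Z'))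
                  || (decide ('a' ≤ ch) && decide (ch ≤ 'z')))) then []
  else
    -- n = round(L ** 0.5): the integer square root, exact on the guarded range L ≤ 1000;
    -- ported as Nat.sqrt (its only uses are the equality test n*n == L, on which the two
    -- agree for every L, and the chunk width when that test passes, where both equal √L)
    let n := Nat.sqrt L
    if n * n ≠ L then []
    else (List.range n).map (fun i =>
      ((cs.drop (i * n)).take n).map (fun ch => String.mk [ch]))

-- ===== PRECONDITION & SPEC =====
def Spec_string2list (c : String) (out : List (List String)) : Prop := out = string2list_alt c
instance (c : String) (out : List (List String)) : Decidable (Spec_string2list c out) := by unfold Spec_string2list; infer_instance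

-- ===== CLAIM (what is proved, stated in full; the proofs are below) =====
def Claim_equal_string2list : Prop := ∀ (c : String), Dom_string2list c → Spec_string2list c (string2list c)

-- ===== LEMMAS AND PROOFS =====

-- per-character: A's ascii-value test and B's char-comparison test reject the same characters
lemma bad_char_eq (ch : Char) :
    (decide (¬(65 ≤ ch.toNat ∧ ch.toNat ≤ 90 ∨ 97 ≤ ch.toNat ∧ ch.toNat ≤ 122 ∨ ch.toNat = 32)) : Bool)
      = !(ch == ' ' || (decide ('A' ≤ ch) && decide (ch ≤ 'Z'))
                    || (decide ('a' ≤ ch) && decide (ch ≤ 'z'))) := by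
  have hsp : (ch = ' ') ↔ ch.toNat = 32 :=
    ⟨by rintro rfl; rfl, fun h => Char.ext (UInt32.toNat_inj.mp h)⟩
  have hA : ('A' ≤ ch) ↔ 65 ≤ ch.toNat := by rw [Char.le_def, UInt32.le_iff_toNat_le]; rfl
  have hZ : (ch ≤ 'Z') ↔ ch.toNat ≤ 90 := by rw [Char.le_def, UInt32.le_iff_toNat_le]; rfl
  have ha : ('a' ≤ ch) ↔ 97 ≤ ch.toNat := by rw [Char.le_def, UInt32.le_iff_toNat_le]; rfl
  have hz : (ch ≤ 'z') ↔ ch.toNat ≤ 122 := by rw [Char.le_def, UInt32.le_iff_toNat_le]; rfl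
  rw [Bool.eq_iff_iff]
  simp only [decide_eq_true_eq, Bool.not_eq_eq_eq_not, Bool.not_true, Bool.or_eq_false_iff,
    Bool.and_eq_false_iff, beq_eq_false_iff_ne, ne_eq, decide_eq_false_iff_not, hsp, hA, hZ, ha, hz]
  tauto

lemma isNotValid_eq_any (cs : List Char) :
    isNotValid cs = cs.any (fun ch =>
      !(ch == ' ' || (decide ('A' ≤ ch) && decide (ch ≤ 'Z'))
                  || (decide ('a' ≤ ch) && decide (ch ≤ 'z')))) := by
  induction cs with
  | nil => rfl
  | cons ch rest ih =>
      simp only [isNotValid, List.any_cons, ← ih, ← bad_char_eq ch]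
      by_cases h : 65 ≤ ch.toNat ∧ ch.toNat ≤ 90 ∨ 97 ≤ ch.toNat ∧ ch.toNat ≤ 122 ∨ ch.toNat = 32 <;>
        simp [h]

lemma isNotSquareLoop_false_of (L m : Nat) (hm : m * m = L) :
    ∀ i, i ≤ m → isNotSquareLoop L i = false := by
  suffices H : ∀ d i, m - i = d → i ≤ m → isNotSquareLoop L i = false from
    fun i hi => H (m - i) i rfl hi
  intro d
  induction d with
  | zero =>
      intro i h0 hi
      have : i = m := by omega
      subst this
      rw [isNotSquareLoop]
      simp [hm]
  | succ k ih =>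
      intro i h0 hi
      have hilt : i < m := by omega
      have h1 : L ≥ i * i := by nlinarith
      have h2 : i * i ≠ L := by nlinarith
      rw [isNotSquareLoop]
      simp only [h1, if_pos, h2, ite_false]
      exact ih (i + 1) (by omega) (by omega)

lemma isNotSquareLoop_true_of (L : Nat) (h : ∀ j, j * j ≠ L) :
    ∀ i, isNotSquareLoop L i = true := by
  suffices H : ∀ d i, L + 1 - i = d → isNotSquareLoop L i = true from
    fun i => H (L + 1 - i) i rfl
  intro d
  induction d with
  | zero =>
      intro i h0
      have h1 : 1 ≤ i := by omega
      have h2 : i ≤ i * i := Nat.le_mul_of_pos_left i (by omega)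
      rw [isNotSquareLoop]
      have : ¬(L ≥ i * i) := by omega
      simp [this]
  | succ k ih =>
      intro i h0
      rw [isNotSquareLoop]
      by_cases hge : L ≥ i * i
      · simp only [hge, if_pos, h i, ite_false]
        exact ih (i + 1) (by omega)
      · simp [hge]

lemma nLoop_eq (L m : Nat) (hm : m * m = L) : ∀ i, i ≤ m → nLoop L i = m := by
  suffices H : ∀ d i, m - i = d → i ≤ m → nLoop L i = m from
    fun i hi => H (m - i) i rfl hi
  intro d
  induction d with
  | zero =>
      intro i h0 hi
      have : i = m := by omega
      subst this
      rw [nLoop]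
      simp [hm]
  | succ k ih =>
      intro i h0 hi
      have hilt : i < m := by omega
      have h1 : i * i < L := by nlinarith
      rw [nLoop]
      simp only [h1, if_pos]
      exact ih (i + 1) (by omega) (by omega)

lemma sqrt_ne (L : Nat) (h : Nat.sqrt L * Nat.sqrt L ≠ L) : ∀ j, j * j ≠ L := by
  intro j hj
  exact h (by rw [← hj, Nat.sqrt_eq j, hj])

lemma grid_eq (cs : List Char) (n : Nat) (hn : 1 ≤ n) (hL : cs.length = n * n) :
    (PySem.List.pyRange 0 (cs.length : Int) (n : Int)).foldl
        (fun result i =>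
          result ++ [(PySem.List.slice cs (some i) (some (i + (n : Int)))).map
                       (fun ch => String.mk [ch])]) []
      = (List.range n).map (fun i =>
          ((cs.drop (i * n)).take n).map (fun ch => String.mk [ch])) := by
  rw [hL]
  rw [PySem.List.pyRange_of_pos 0 ((n * n : Nat) : Int) (by exact_mod_cast hn)]
  have hpos : (0 : Int) < ((n * n : Nat) : Int) := by
    have : 1 ≤ n * n := Nat.one_le_iff_ne_zero.mpr (by positivity)
    exact_mod_cast this
  rw [if_pos hpos]
  have hcount : ((((n * n : Nat) : Int) - 0 + (n : Int) - 1) / (n : Int)).toNat = n := by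
    have h1 : (((n * n : Nat) : Int) - 0 + (n : Int) - 1) = ((n * n + n - 1 : Nat) : Int) := by
      push_cast; omega
    have h2 : (n * n + n - 1) / n = n := by
      have h3 : n * n + n - 1 = (n - 1) + n * n := by omega
      rw [h3, Nat.add_mul_div_left _ _ (by omega), Nat.div_eq_of_lt (by omega)]
      omega
    rw [h1, ← Int.natCast_ediv, h2]
    exact Int.toNat_natCast n
  rw [hcount, List.foldl_map, PySem.List.foldl_append_singleton_eq_map, List.nil_append]
  refine List.map_congr_left (fun k hk => ?_)
  have hcast : (0 : Int) + (n : Int) * (k : Int) = ((n * k : Nat) : Int) := by push_cast; ring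
  rw [hcast, PySem.List.slice_natCast_add cs (n * k) n, Nat.mul_comm n k]

-- ===== VERDICT (by name: the statement is the Claim_ definition above) =====
theorem string2list_spec : Claim_equal_string2list := by
  intro c _
  show string2list c = string2list_alt c
  unfold string2list string2list_alt isNotSquare
  simp only [isNotValid_eq_any]
  by_cases hlen : 1 ≤ c.toList.length ∧ c.toList.length ≤ 1000
  · rw [decide_eq_true hlen, if_neg (not_not_intro hlen)]
    by_cases hbad : (c.toList.any (fun ch =>
        !(ch == ' ' || (decide ('A' ≤ ch) && decide (ch ≤ 'Z'))
                    || (decide ('a' ≤ ch) && decide (ch ≤ 'z'))))) = true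
    · rw [hbad,
        if_pos (show (true || isNotSquareLoop c.toList.length 1 || !true) = true by simp),
        if_pos rfl]
    · have hbad' := eq_false_of_ne_true hbad
      rw [hbad', if_neg (Bool.false_ne_true)]
      by_cases hsq : Nat.sqrt c.toList.length * Nat.sqrt c.toList.length = c.toList.length
      · have hm1 : 1 ≤ Nat.sqrt c.toList.length := Nat.sqrt_pos.mpr (by omega)
        have hns : isNotSquareLoop c.toList.length 1 = false :=
          isNotSquareLoop_false_of _ _ hsq 1 hm1
        have hn : nLoop c.toList.length 1 = Nat.sqrt c.toList.length := nLoop_eq _ _ hsq 1 hm1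
        rw [hns]
        simp only [Bool.not_true, Bool.or_false]
        rw [if_neg (by simp), hn, if_neg (not_not_intro hsq), if_neg (not_not_intro hsq)]
        exact grid_eq c.toList (Nat.sqrt c.toList.length) hm1 hsq.symm
      · have hns : isNotSquareLoop c.toList.length 1 = true :=
          isNotSquareLoop_true_of _ (sqrt_ne _ hsq) 1
        rw [hns,
          if_pos (show ((false || true || !true) = true) by simp),
          if_pos hsq]
  · rw [decide_eq_false hlen, if_pos hlen]
    simp
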